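-- pv_equiv track=rewrite | github.com/francis95-han/python-study | hack/CTF/Day01/OldPasswd.py | charShift
-- ===== SOURCE A (Python) =====
-- lis = 'abcdefghijklmnopqrstuvwxyz'
--
-- upperLis = 'ABCDEFGHIJKLMNOPQRSTUVWXYZ'
--
-- def charShift(string, width=1, times=25):
--     for j in range(times):
--         results = []
--         for i in range(len(string)):
--             if string[i].islower():
--                 results.append(lis[(lis.index(string[i]) + 1 + j) % len(lis)])
--             elif string[i].isupper():
--                 results.append(upperLis[(upperLis.index(string[i]) + 1 + j) % len(upperLis)])
--             else:
--                 results.append(string[i])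
--         yield ''.join(results)
-- ===== SOURCE B (Python) =====
-- def charShift(string, width=1, times=25):
--     # Accumulator decomposition: each yielded string is the previous one
--     # shifted by one more position (per-letter arithmetic, no table lookups).
--     def shift1(s):
--         out = []
--         for ch in s:
--             if 'a' <= ch <= 'z':
--                 out.append(chr((ord(ch) - 97 + 1) % 26 + 97))
--             elif 'A' <= ch <= 'Z':
--                 out.append(chr((ord(ch) - 65 + 1) % 26 + 65))
--             else:
--                 out.append(ch)
--         return ''.join(out)
--     cur = string
--     for _ in range(times):
--         cur = shift1(cur)
--         yield cur
-- ===== Notes on version B (the rewrite author's own statement) =====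
-- stated objective: faster
-- what changed: B threads the previously yielded string as an accumulator and shifts each letter of it by one position per iteration using character arithmetic, instead of rescanning the original string with a fresh offset 1+j and lis.index table lookups on every iteration.
import Mathlib
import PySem

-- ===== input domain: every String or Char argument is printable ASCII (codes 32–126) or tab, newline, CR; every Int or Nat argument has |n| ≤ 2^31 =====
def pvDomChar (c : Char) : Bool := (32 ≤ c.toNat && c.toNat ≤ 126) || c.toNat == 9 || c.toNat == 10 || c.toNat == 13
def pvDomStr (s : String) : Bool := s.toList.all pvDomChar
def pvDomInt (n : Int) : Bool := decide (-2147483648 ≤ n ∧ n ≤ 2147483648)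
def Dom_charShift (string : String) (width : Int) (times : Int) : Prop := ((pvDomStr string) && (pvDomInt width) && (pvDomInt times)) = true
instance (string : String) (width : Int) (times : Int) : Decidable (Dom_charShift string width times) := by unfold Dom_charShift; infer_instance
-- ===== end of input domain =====

-- B shifts the previously produced string by one more step each iteration (accumulator)
-- instead of A's rescan of the original with offset 1+j and table lookups; same output.
-- Both Pythons are generators; equivalence is about the sequence of yielded values.

-- ===== PORT A =====
def lisA : List Char := "abcdefghijklmnopqrstuvwxyz".toList
def upperLisA : List Char := "ABCDEFGHIJKLMNOPQRSTUVWXYZ".toList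

def charShift (string : String) (width : Int) (times : Int) : List String :=
  (PySem.List.pyRange 0 times 1).map (fun j =>
    let results : List Char := string.toList.foldl (fun results c =>
      if PySem.Chars.islower c then
        results ++ [(PySem.List.pyGet? lisA
          (PySem.Int.mod ((((PySem.List.index? lisA c).getD 0 : Nat) : Int) + 1 + j)
            ((lisA.length : Int)))).getD c]
      else if PySem.Chars.isupper c then
        results ++ [(PySem.List.pyGet? upperLisA
          (PySem.Int.mod ((((PySem.List.index? upperLisA c).getD 0 : Nat) : Int) + 1 + j)
            ((upperLisA.length : Int)))).getD c]
      else
        results ++ [c]) []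
    String.mk results)

-- ===== PORT B =====
def shift1Char (c : Char) : Char :=
  if 'a' ≤ c ∧ c ≤ 'z' then Char.ofNat ((c.toNat - 97 + 1) % 26 + 97)
  else if 'A' ≤ c ∧ c ≤ 'Z' then Char.ofNat ((c.toNat - 65 + 1) % 26 + 65)
  else c

def altGo (cur : List Char) : Nat → List String
  | 0 => []
  | n + 1 =>
    let nxt := cur.map shift1Char
    String.mk nxt :: altGo nxt n

def charShift_alt (string : String) (width : Int) (times : Int) : List String :=
  altGo string.toList times.toNat

-- ===== PRECONDITION & SPEC =====
def Spec_charShift (string : String) (width : Int) (times : Int) (out : List String) : Prop := out = charShift_alt string width times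
instance (string : String) (width : Int) (times : Int) (out : List String) : Decidable (Spec_charShift string width times out) := by unfold Spec_charShift; infer_instance

-- ===== CLAIM (what is proved, stated in full; the proofs are below) =====
def Claim_equal_charShift : Prop := ∀ (string : String) (width : Int) (times : Int), Dom_charShift string width times → Spec_charShift string width times (charShift string width times)

-- ===== LEMMAS AND PROOFS =====

-- A's per-character transform at outer index j (proof helper).
def fA (j : Int) (c : Char) : Char :=
  if PySem.Chars.islower c then
    (PySem.List.pyGet? lisA
      (PySem.Int.mod ((((PySem.List.index? lisA c).getD 0 : Nat) : Int) + 1 + j)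
        ((lisA.length : Int)))).getD c
  else if PySem.Chars.isupper c then
    (PySem.List.pyGet? upperLisA
      (PySem.Int.mod ((((PySem.List.index? upperLisA c).getD 0 : Nat) : Int) + 1 + j)
        ((upperLisA.length : Int)))).getD c
  else c

theorem char_eq_of_toNat (a b : Char) (h : a.toNat = b.toNat) : a = b := by
  apply Char.ext
  exact UInt32.toNat_inj.mp h

-- table facts, all decidable over k < 26
theorem lisA_toNat : ∀ k < 26, (lisA.getD k ' ').toNat = 97 + k := by decide
theorem upperLisA_toNat : ∀ k < 26, (upperLisA.getD k ' ').toNat = 65 + k := by decide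
theorem lisA_index : ∀ k < 26, PySem.List.index? lisA (lisA.getD k ' ') = some k := by decide
theorem upperLisA_index : ∀ k < 26, PySem.List.index? upperLisA (upperLisA.getD k ' ') = some k := by decide
theorem shift1_lisA : ∀ m < 26, shift1Char (lisA.getD m ' ') = lisA.getD ((m + 1) % 26) ' ' := by decide
theorem shift1_upperLisA : ∀ m < 26, shift1Char (upperLisA.getD m ' ') = upperLisA.getD ((m + 1) % 26) ' ' := by decide

theorem lower_mem (c : Char) (h : PySem.Chars.islower c = true) :
    ∃ k, k < 26 ∧ c = lisA.getD k ' ' := by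
  have hb : ('a' ≤ c && c ≤ 'z') = true := by
    simpa [PySem.Chars.islower] using h
  simp only [Bool.and_eq_true, decide_eq_true_eq] at hb
  have h1 : 97 ≤ c.toNat := hb.1
  have h2 : c.toNat ≤ 122 := hb.2
  refine ⟨c.toNat - 97, by omega, ?_⟩
  apply char_eq_of_toNat
  rw [lisA_toNat (c.toNat - 97) (by omega)]
  omega

theorem upper_mem (c : Char) (h : PySem.Chars.isupper c = true) :
    ∃ k, k < 26 ∧ c = upperLisA.getD k ' ' := by
  have hb : ('A' ≤ c && c ≤ 'Z') = true := by
    simpa [PySem.Chars.isupper] using h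
  simp only [Bool.and_eq_true, decide_eq_true_eq] at hb
  have h1 : 65 ≤ c.toNat := hb.1
  have h2 : c.toNat ≤ 90 := hb.2
  refine ⟨c.toNat - 65, by omega, ?_⟩
  apply char_eq_of_toNat
  rw [upperLisA_toNat (c.toNat - 65) (by omega)]
  omega

-- A's per-character value at Nat offset n, in table form
theorem fA_lower (n k : Nat) (hk : k < 26) :
    fA (n : Int) (lisA.getD k ' ') = lisA.getD ((k + 1 + n) % 26) ' ' := by
  have hl : PySem.Chars.islower (lisA.getD k ' ') = true := by
    interval_cases k <;> decide
  unfold fA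
  rw [if_pos hl, lisA_index k hk]
  have hlen : (lisA.length : Int) = (26 : Nat) := by decide
  have hcast : ((k : Nat) : Int) + 1 + (n : Int) = ((k + 1 + n : Nat) : Int) := by push_cast; ring
  rw [hlen, Option.getD_some, hcast, PySem.Int.mod_natCast, PySem.List.pyGet?_natCast]
  have hm : (k + 1 + n) % 26 < lisA.length := by
    have : lisA.length = 26 := by decide
    omega
  simp [List.getD, List.getElem?_eq_getElem hm]

theorem fA_upper (n k : Nat) (hk : k < 26) :
    fA (n : Int) (upperLisA.getD k ' ') = upperLisA.getD ((k + 1 + n) % 26) ' ' := by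
  have hu : PySem.Chars.isupper (upperLisA.getD k ' ') = true := by
    interval_cases k <;> decide
  have hl : PySem.Chars.islower (upperLisA.getD k ' ') = false := by
    interval_cases k <;> decide
  unfold fA
  rw [if_neg (by rw [hl]; exact Bool.false_ne_true), if_pos hu, upperLisA_index k hk]
  have hlen : (upperLisA.length : Int) = (26 : Nat) := by decide
  have hcast : ((k : Nat) : Int) + 1 + (n : Int) = ((k + 1 + n : Nat) : Int) := by push_cast; ring
  rw [hlen, Option.getD_some, hcast, PySem.Int.mod_natCast, PySem.List.pyGet?_natCast]
  have hm : (k + 1 + n) % 26 < upperLisA.length := by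
    have : upperLisA.length = 26 := by decide
    omega
  simp [List.getD, List.getElem?_eq_getElem hm]

theorem shift1_other (c : Char) (hl : PySem.Chars.islower c = false)
    (hu : PySem.Chars.isupper c = false) : shift1Char c = c := by
  have hl' : ¬ ('a' ≤ c ∧ c ≤ 'z') := by
    have := hl; simp [PySem.Chars.islower] at this
    intro hc; exact absurd (this hc.1) (by simpa using hc.2)
  have hu' : ¬ ('A' ≤ c ∧ c ≤ 'Z') := by
    have := hu; simp [PySem.Chars.isupper] at this
    intro hc; exact absurd (this hc.1) (by simpa using hc.2)
  unfold shift1Char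
  rw [if_neg hl', if_neg hu']

theorem fA_other (j : Int) (c : Char) (hl : PySem.Chars.islower c = false)
    (hu : PySem.Chars.isupper c = false) : fA j c = c := by
  unfold fA
  rw [if_neg (by simp [hl]), if_neg (by simp [hu])]

-- the accumulator relation: A's column n+1 is shift1Char of A's column n
theorem fA_zero (c : Char) : fA (0 : Int) c = shift1Char c := by
  by_cases hl : PySem.Chars.islower c = true
  · obtain ⟨k, hk, rfl⟩ := lower_mem c hl
    have h0 : ((0 : Nat) : Int) = (0 : Int) := rfl
    rw [← h0, fA_lower 0 k hk]
    rw [shift1_lisA k hk]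
  · by_cases hu : PySem.Chars.isupper c = true
    · obtain ⟨k, hk, rfl⟩ := upper_mem c hu
      have h0 : ((0 : Nat) : Int) = (0 : Int) := rfl
      rw [← h0, fA_upper 0 k hk]
      rw [shift1_upperLisA k hk]
    · rw [fA_other 0 c (by simpa using hl) (by simpa using hu),
        shift1_other c (by simpa using hl) (by simpa using hu)]

theorem fA_succ (n : Nat) (c : Char) :
    fA ((n + 1 : Nat) : Int) c = shift1Char (fA (n : Int) c) := by
  by_cases hl : PySem.Chars.islower c = true
  · obtain ⟨k, hk, rfl⟩ := lower_mem c hl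
    rw [fA_lower (n + 1) k hk, fA_lower n k hk]
    rw [shift1_lisA ((k + 1 + n) % 26) (Nat.mod_lt _ (by omega))]
    congr 1
    omega
  · by_cases hu : PySem.Chars.isupper c = true
    · obtain ⟨k, hk, rfl⟩ := upper_mem c hu
      rw [fA_upper (n + 1) k hk, fA_upper n k hk]
      rw [shift1_upperLisA ((k + 1 + n) % 26) (Nat.mod_lt _ (by omega))]
      congr 1
      omega
    · have hl' := (by simpa using hl : PySem.Chars.islower c = false)
      have hu' := (by simpa using hu : PySem.Chars.isupper c = false)
      rw [fA_other _ c hl' hu', fA_other _ c hl' hu', shift1_other c hl' hu']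

theorem fA_eq_iterate (n : Nat) (c : Char) :
    fA (n : Int) c = shift1Char^[n + 1] c := by
  induction n with
  | zero => simpa [Function.iterate_one] using fA_zero c
  | succ m ih =>
    rw [fA_succ m c, ih, ← Function.iterate_succ_apply' shift1Char (m + 1) c]

theorem foldl_fA (j : Int) (l : List Char) (init : List Char) :
    l.foldl (fun results c =>
      if PySem.Chars.islower c then
        results ++ [(PySem.List.pyGet? lisA
          (PySem.Int.mod ((((PySem.List.index? lisA c).getD 0 : Nat) : Int) + 1 + j)
            ((lisA.length : Int)))).getD c]
      else if PySem.Chars.isupper c then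
        results ++ [(PySem.List.pyGet? upperLisA
          (PySem.Int.mod ((((PySem.List.index? upperLisA c).getD 0 : Nat) : Int) + 1 + j)
            ((upperLisA.length : Int)))).getD c]
      else
        results ++ [c]) init = init ++ l.map (fA j) := by
  induction l generalizing init with
  | nil => simp
  | cons c t ih =>
    simp only [List.foldl_cons, List.map_cons]
    rw [ih]
    unfold fA
    split_ifs <;> simp
  
theorem altGo_eq (t : Nat) (cur : List Char) :
    altGo cur t = (List.range t).map (fun n => String.mk (cur.map (shift1Char^[n + 1]))) := by
  induction t generalizing cur with
  | zero => simp [altGo]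
  | succ m ih =>
    rw [altGo, ih (cur.map shift1Char), List.range_succ_eq_map, List.map_cons, List.map_map]
    congr 1
    simp

-- ===== VERDICT (by name: the statement is the Claim_ definition above) =====
theorem charShift_spec : Claim_equal_charShift := by
  intro string width times _
  unfold Spec_charShift charShift charShift_alt
  rw [altGo_eq]
  rw [PySem.List.pyRange_one]
  simp only [Int.sub_zero, List.map_map]
  apply List.map_congr_left
  intro n _
  simp only [Function.comp_apply, Int.zero_add]
  rw [foldl_fA (n : Int) string.toList []]
  simp only [List.nil_append]
  congr 1
  apply List.map_congr_left
  intro c _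
  exact fA_eq_iterate n c
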